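-- pv_equiv track=rewrite | github.com/bighousevn/Rag_Graph_LawLaw | triplet_extractor_vi.py | pick_controlled_action_idx
-- ===== SOURCE A (Python) =====
-- from typing import Any, Dict, List, Optional, Sequence
--
-- ACTION_LINK_LABELS = {"xcomp", "ccomp", "vmod", "advcl", "iob", "iobj"}
--
-- def is_verb_pos(tag: str) -> bool:
--     upper = tag.upper()
--     return upper.startswith("V") or upper == "VERB"
--
-- def pick_controlled_action_idx(root_idx: int, dep: List[str], head: List[int], pos: List[str]) -> int:
--     candidates = [
--         i
--         for i, d in enumerate(dep, start=1)
--         if head[i - 1] == root_idx and d.lower() in ACTION_LINK_LABELS and is_verb_pos(pos[i - 1])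
--     ]
--     if not candidates:
--         return -1
--     # Prefer right-side verbal complements because they usually encode the required action.
--     right_side = [i for i in candidates if i > root_idx]
--     return right_side[0] if right_side else candidates[0]
-- ===== SOURCE B (Python) =====
-- ACTION_LINK_LABELS = {"xcomp", "ccomp", "vmod", "advcl", "iob", "iobj"}
--
-- def is_verb_pos(tag: str) -> bool:
--     upper = tag.upper()
--     return upper.startswith("V") or upper == "VERB"
--
-- def pick_controlled_action_idx(root_idx, dep, head, pos):
--     # Any candidate i > root_idx corresponds to a 0-based position j >= root_idx,
--     # i.e. lies in the suffix starting at split = min(max(root_idx, 0), n).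
--     # So: search the suffix first (its first hit IS the preferred right-side
--     # candidate), then wrap around to the prefix for the overall-first fallback.
--     def hits(j):
--         return head[j] == root_idx and dep[j].lower() in ACTION_LINK_LABELS and is_verb_pos(pos[j])
--     n = len(dep)
--     split = min(max(root_idx, 0), n)
--     for j in range(split, n):
--         if hits(j):
--             return j + 1
--     for j in range(0, split):
--         if hits(j):
--             return j + 1
--     return -1
-- ===== Notes on version B (the rewrite author's own statement) =====
-- stated objective: alternative
-- what changed: Instead of building the full candidate list and rescanning it for right-side entries, B exploits that enumerate indices ascend: it searches the suffix of positions at/after the root first (first hit there is the preferred right-side candidate, returned immediately) and only then wraps around to the prefix for the overall-first fallback; no lists are built.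
import Mathlib
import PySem

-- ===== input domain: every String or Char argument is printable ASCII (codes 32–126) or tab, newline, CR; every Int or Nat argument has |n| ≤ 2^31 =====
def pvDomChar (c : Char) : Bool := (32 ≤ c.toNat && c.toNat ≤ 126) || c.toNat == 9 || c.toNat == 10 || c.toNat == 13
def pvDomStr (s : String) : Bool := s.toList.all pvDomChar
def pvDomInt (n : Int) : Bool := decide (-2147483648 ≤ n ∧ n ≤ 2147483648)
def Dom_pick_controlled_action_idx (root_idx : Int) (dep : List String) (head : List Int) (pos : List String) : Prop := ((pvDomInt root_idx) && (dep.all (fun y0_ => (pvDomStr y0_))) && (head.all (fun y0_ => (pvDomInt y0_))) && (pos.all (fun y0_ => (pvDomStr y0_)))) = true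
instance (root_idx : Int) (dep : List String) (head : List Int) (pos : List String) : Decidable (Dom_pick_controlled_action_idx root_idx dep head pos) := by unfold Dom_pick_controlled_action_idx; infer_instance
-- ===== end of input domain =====

-- ===== PORT A =====
-- A builds the full candidate list then rescans it for right-side entries; B instead
-- searches the positions at/after the root first and wraps to the prefix (alternative
-- decomposition, no lists built; same return value).

-- set literal ACTION_LINK_LABELS; only membership is tested
def actionLinkLabels : List String := ["xcomp", "ccomp", "vmod", "advcl", "iob", "iobj"]

def is_verb_pos (tag : String) : Bool :=
  let upper := PySem.Str.upper tag
  PySem.Str.startswith upper "V" || upper == "VERB"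

-- the comprehension's filter condition over the enumerated pair (i, d)
def candOK (root_idx : Int) (head : List Int) (pos : List String) (i : Int) (d : String) : Bool :=
  head.getD (i - 1).toNat 0 == root_idx
    && actionLinkLabels.contains (PySem.Str.lower d)
    && is_verb_pos (pos.getD (i - 1).toNat "")

def pick_controlled_action_idx (root_idx : Int) (dep : List String) (head : List Int) (pos : List String) : Int :=
  let candidates : List Int :=
    (PySem.List.enumerate dep 1).filterMap
      (fun p => if candOK root_idx head pos p.1 p.2 then some p.1 else none)
  if candidates = [] then -1
  else
    let right_side := candidates.filter (fun i => decide (i > root_idx))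
    match right_side with
    | x :: _ => x
    | [] => candidates.headD (-1)

-- ===== PORT B =====
-- B's inner predicate hits(j): the same test, on the 0-based position j
def hitsB (root_idx : Int) (dep : List String) (head : List Int) (pos : List String) (j : Int) : Bool :=
  head.getD j.toNat 0 == root_idx
    && actionLinkLabels.contains (PySem.Str.lower (dep.getD j.toNat ""))
    && is_verb_pos (pos.getD j.toNat "")

def pick_controlled_action_idx_alt (root_idx : Int) (dep : List String) (head : List Int) (pos : List String) : Int :=
  let n : Int := dep.length
  let split : Int := min (max root_idx 0) n
  match (PySem.List.pyRange split n 1).find? (hitsB root_idx dep head pos) with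
  | some j => j + 1
  | none =>
    match (PySem.List.pyRange 0 split 1).find? (hitsB root_idx dep head pos) with
    | some j => j + 1
    | none => -1

-- ===== PRECONDITION & SPEC =====
-- Pre_ excludes exactly the inputs where A raises IndexError: head must cover every
-- position of dep, and pos must cover each position whose head/label test passes
-- (Python short-circuits, so pos is only indexed there).
def Pre_pick_controlled_action_idx (root_idx : Int) (dep : List String) (head : List Int) (pos : List String) : Prop :=
  dep.length <= head.length ∧
  ∀ k, k < dep.length →
    (head.getD k 0 = root_idx ∧ actionLinkLabels.contains (PySem.Str.lower (dep.getD k "")) = true)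
    → k < pos.length

instance (root_idx : Int) (dep : List String) (head : List Int) (pos : List String) : Decidable (Pre_pick_controlled_action_idx root_idx dep head pos) := by unfold Pre_pick_controlled_action_idx; infer_instance

def pvWitness_pick_controlled_action_idx : Int × List String × List Int × List String :=
  (1, ["nsubj", "xcomp"], [2, 1], ["N", "V"])

def Spec_pick_controlled_action_idx (root_idx : Int) (dep : List String) (head : List Int) (pos : List String) (out : Int) : Prop := out = pick_controlled_action_idx_alt root_idx dep head pos
instance (root_idx : Int) (dep : List String) (head : List Int) (pos : List String) (out : Int) : Decidable (Spec_pick_controlled_action_idx root_idx dep head pos out) := by unfold Spec_pick_controlled_action_idx; infer_instance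

-- ===== CLAIM (what is proved, stated in full; the proofs are below) =====
def Claim_equal_pick_controlled_action_idx : Prop := ∀ (root_idx : Int) (dep : List String) (head : List Int) (pos : List String), Dom_pick_controlled_action_idx root_idx dep head pos → Pre_pick_controlled_action_idx root_idx dep head pos → Spec_pick_controlled_action_idx root_idx dep head pos (pick_controlled_action_idx root_idx dep head pos)

-- ===== LEMMAS AND PROOFS =====

-- the 1-based enumeration of dep is the 0-based range, shifted and paired with dep's entries
theorem enumerate_one_eq (dep : List String) :
    PySem.List.enumerate dep 1 =
      (PySem.List.pyRange 0 (dep.length : Int) 1).map (fun j => (j + 1, dep.getD j.toNat "")) := by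
  apply List.ext_getElem?
  intro k
  by_cases hk : k < dep.length
  · simp [hk, PySem.List.getElem_enumerate,
      PySem.List.length_enumerate, PySem.List.length_pyRange_one,
      List.getD_eq_getElem?_getD, add_comm]
  · have h1 : (PySem.List.enumerate dep 1).length ≤ k := by
      simp [PySem.List.length_enumerate]; omega
    have h2 : ((PySem.List.pyRange 0 (dep.length : Int) 1).map
        (fun j => (j + 1, dep.getD j.toNat ""))).length ≤ k := by
      simp [PySem.List.length_pyRange_one]; omega
    rw [List.getElem?_eq_none h1, List.getElem?_eq_none h2]

-- head of a "keep j+1 where p j" filterMap is the first j with p j, plus one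
theorem head_filterMap_find (p : Int → Bool) :
    ∀ (l : List Int),
      (l.filterMap (fun j => if p j then some (j + 1) else none)).head? =
        (l.find? p).map (fun j => j + 1) := by
  intro l
  induction l with
  | nil => simp
  | cons x t ih =>
    by_cases h : p x = true
    · simp [h]
    · simp [h, ih]

-- ===== VERDICT (by name: the statement is the Claim_ definition above) =====
theorem pick_controlled_action_idx_spec : Claim_equal_pick_controlled_action_idx := by
  intro root_idx dep head pos _ _
  unfold Spec_pick_controlled_action_idx
  unfold pick_controlled_action_idx pick_controlled_action_idx_alt
  simp only []
  set n : Int := (dep.length : Int) with hn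
  set split : Int := min (max root_idx 0) n with hsplit
  have hn0 : 0 ≤ n := by positivity
  have hs0 : 0 ≤ split := by omega
  have hsn : split ≤ n := by omega
  have hfun : (fun j : Int => if candOK root_idx head pos (j + 1) (dep.getD j.toNat "") then some (j + 1) else none)
      = (fun j : Int => if hitsB root_idx dep head pos j then some (j + 1) else none) := by
    funext j
    simp [candOK, hitsB, add_sub_cancel_right]
  have hc : (PySem.List.enumerate dep 1).filterMap
      (fun p => if candOK root_idx head pos p.1 p.2 then some p.1 else none)
      = (PySem.List.pyRange 0 split 1).filterMap (fun j => if hitsB root_idx dep head pos j then some (j + 1) else none)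
        ++ (PySem.List.pyRange split n 1).filterMap (fun j => if hitsB root_idx dep head pos j then some (j + 1) else none) := by
    rw [enumerate_one_eq, List.filterMap_map]
    rw [PySem.List.pyRange_one_append 0 split n hs0 hsn, List.filterMap_append]
    simp only [Function.comp_def]
    rw [hfun]
  set cgl := (PySem.List.pyRange 0 split 1).filterMap (fun j => if hitsB root_idx dep head pos j then some (j + 1) else none) with hcgl
  set cgr := (PySem.List.pyRange split n 1).filterMap (fun j => if hitsB root_idx dep head pos j then some (j + 1) else none) with hcgr
  have hfilterL : cgl.filter (fun i => decide (i > root_idx)) = [] := by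
    rw [List.filter_eq_nil_iff]
    intro i hi
    rw [hcgl, List.mem_filterMap] at hi
    obtain ⟨j, hj, hij⟩ := hi
    rw [PySem.List.mem_pyRange_one] at hj
    by_cases h : hitsB root_idx dep head pos j = true <;> simp [h] at hij
    simp only [gt_iff_lt, decide_eq_true_eq]
    omega
  have hfilterR : cgr.filter (fun i => decide (i > root_idx)) = cgr := by
    rw [List.filter_eq_self]
    intro i hi
    rw [hcgr, List.mem_filterMap] at hi
    obtain ⟨j, hj, hij⟩ := hi
    rw [PySem.List.mem_pyRange_one] at hj
    by_cases h : hitsB root_idx dep head pos j = true <;> simp [h] at hij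
    simp only [gt_iff_lt, decide_eq_true_eq]
    omega
  rw [hc]
  cases hf : List.find? (hitsB root_idx dep head pos) (PySem.List.pyRange split n 1) with
  | some j =>
    have hhead : cgr.head? = some (j + 1) := by
      rw [hcgr, head_filterMap_find, hf]; rfl
    obtain ⟨t, ht⟩ : ∃ t, cgr = (j + 1) :: t := by
      cases hx : cgr with
      | nil => rw [hx] at hhead; simp at hhead
      | cons a t =>
        rw [hx] at hhead; simp at hhead
        exact ⟨t, by rw [hhead]⟩
    have hne : cgl ++ cgr ≠ [] := by rw [ht]; simp
    rw [if_neg hne, List.filter_append, hfilterL, hfilterR, ht]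
    simp
  | none =>
    have hhead : cgr.head? = none := by
      rw [hcgr, head_filterMap_find, hf]; rfl
    have hre : cgr = [] := List.head?_eq_none_iff.mp hhead
    rw [hre, List.append_nil]
    cases hf2 : List.find? (hitsB root_idx dep head pos) (PySem.List.pyRange 0 split 1) with
    | some j =>
      have hhead2 : cgl.head? = some (j + 1) := by
        rw [hcgl, head_filterMap_find, hf2]; rfl
      obtain ⟨t, ht⟩ : ∃ t, cgl = (j + 1) :: t := by
        cases hx : cgl with
        | nil => rw [hx] at hhead2; simp at hhead2
        | cons a t =>
          rw [hx] at hhead2; simp at hhead2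
          exact ⟨t, by rw [hhead2]⟩
      have hfl : ((j + 1) :: t).filter (fun i => decide (i > root_idx)) = [] := by
        rw [← ht]; exact hfilterL
      rw [ht, if_neg (by simp), hfl]
      simp
    | none =>
      have hhead2 : cgl.head? = none := by
        rw [hcgl, head_filterMap_find, hf2]; rfl
      rw [List.head?_eq_none_iff.mp hhead2]
      simp
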